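-- pv_equiv track=rewrite | github.com/XoomitLXH/baoyan-radar-skill | scripts/run_dashboard.py | build_source_options
-- ===== SOURCE A (Python) =====
-- from typing import Any, Dict, List, Optional
--
-- def build_source_options(items: List[Dict[str, Any]]) -> List[Dict[str, str]]:
--     values: List[Dict[str, str]] = []
--     seen = set()
--     for item in items:
--         label = item["school"] or item["sourceName"]
--         if not label or label in seen:
--             continue
--         seen.add(label)
--         values.append({"value": label, "label": label})
--     values.sort(key=lambda x: x["label"])
--     return values
-- ===== SOURCE B (Python) =====
-- def build_source_options(items):
--     labels = sorted(
--         label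
--         for item in items
--         if (label := (item["school"] or item["sourceName"]))
--     )
--     out = []
--     prev = None
--     for label in labels:
--         if label != prev:
--             out.append({"value": label, "label": label})
--             prev = label
--     return out
-- ===== Notes on version B (the rewrite author's own statement) =====
-- stated objective: alternative
-- what changed: Replaces the seen-set dedup-then-sort with collecting all non-empty labels, sorting them, and deduplicating by a single adjacent-scan over the sorted list (no set at all).
import Mathlib
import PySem

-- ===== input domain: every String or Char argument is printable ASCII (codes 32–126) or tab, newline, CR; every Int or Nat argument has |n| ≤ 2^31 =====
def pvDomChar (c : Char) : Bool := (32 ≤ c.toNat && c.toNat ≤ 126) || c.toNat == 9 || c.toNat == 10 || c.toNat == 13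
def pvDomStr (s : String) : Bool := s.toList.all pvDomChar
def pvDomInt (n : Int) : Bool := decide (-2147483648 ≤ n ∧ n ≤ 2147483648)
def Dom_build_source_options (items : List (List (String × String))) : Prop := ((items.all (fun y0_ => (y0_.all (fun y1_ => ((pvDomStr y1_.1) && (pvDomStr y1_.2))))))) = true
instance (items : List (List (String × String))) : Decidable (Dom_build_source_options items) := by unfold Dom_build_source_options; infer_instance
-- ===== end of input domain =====

-- B replaces A's seen-set + sort with "collect non-empty labels, sort, adjacent-scan dedup" (alternative decomposition, same cost).

-- shared helper: item[k] as first-match association-list lookup (the value; "" only reachable outside Pre_)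
def pvItemGet (item : List (String × String)) (k : String) : String :=
  ((item.find? (fun p => p.1 == k)).map (fun p => p.2)).getD ""

-- item["school"] or item["sourceName"]  (the identical expression occurs in both Pythons)
def pvItemLabel (item : List (String × String)) : String :=
  let s := pvItemGet item "school"
  if s = "" then pvItemGet item "sourceName" else s

-- ===== PORT A =====
-- sort key: x["label"]
def pvKeyA (x : List (String × String)) : String :=
  ((x.find? (fun p => p.1 == "label")).map (fun p => p.2)).getD ""

def build_source_options (items : List (List (String × String))) : List (List (String × String)) :=
  let st := items.foldl
    (fun (st : List (List (String × String)) × PySem.Set String) item =>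
      let label := pvItemLabel item
      if label = "" ∨ PySem.Set.contains st.2 label = true then st
      else (st.1 ++ [[("value", label), ("label", label)]], PySem.Set.add st.2 label))
    ([], PySem.Set.empty)
  PySem.List.sorted st.1 pvKeyA false

-- ===== PORT B =====
def build_source_options_alt (items : List (List (String × String))) : List (List (String × String)) :=
  let labels := PySem.List.sorted
    (items.filterMap (fun item =>
      let label := pvItemLabel item
      if label = "" then none else some label))
    (fun x => x) false
  (labels.foldl
    (fun (st : List (List (String × String)) × Option String) label =>
      if st.2 ≠ some label then (st.1 ++ [[("value", label), ("label", label)]], some label) else st)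
    ([], none)).1

-- ===== PRECONDITION & SPEC =====
-- Pre_ excludes exactly the inputs where the Python raises KeyError: an item without a "school" key,
-- or an item whose "school" value is falsy ("") and which lacks a "sourceName" key.
def Pre_build_source_options (items : List (List (String × String))) : Prop :=
  (items.all (fun item =>
    (item.find? (fun p => p.1 == "school")).isSome &&
    (!(pvItemGet item "school" == "") || (item.find? (fun p => p.1 == "sourceName")).isSome))) = true
instance (items : List (List (String × String))) : Decidable (Pre_build_source_options items) := by
  unfold Pre_build_source_options; infer_instance

def pvWitness_build_source_options : (List (List (String × String))) :=
  [[("school", "B"), ("sourceName", "x")], [("school", ""), ("sourceName", "A")], [("school", "B")]]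

def Spec_build_source_options (items : List (List (String × String))) (out : List (List (String × String))) : Prop := out = build_source_options_alt items
instance (items : List (List (String × String))) (out : List (List (String × String))) : Decidable (Spec_build_source_options items out) := by unfold Spec_build_source_options; infer_instance

-- ===== CLAIM (what is proved, stated in full; the proofs are below) =====
def Claim_equal_build_source_options : Prop := ∀ (items : List (List (String × String))), Dom_build_source_options items → Pre_build_source_options items → Spec_build_source_options items (build_source_options items)

-- ===== LEMMAS AND PROOFS =====

-- the record {"value": l, "label": l}
def pvMkRec (l : String) : List (String × String) := [("value", l), ("label", l)]

-- the non-empty labels, in item order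
def pvLabs (items : List (List (String × String))) : List String :=
  items.filterMap (fun item =>
    let label := pvItemLabel item
    if label = "" then none else some label)

-- first-occurrence dedup against an initial seen-set (A's loop, labels only)
def pvDFrom (s : PySem.Set String) : List String → List String
  | [] => []
  | l :: t => if PySem.Set.contains s l = true then pvDFrom s t else l :: pvDFrom (PySem.Set.add s l) t

-- adjacent dedup with a "previous" marker (B's loop, labels only)
def pvAdj (prev : Option String) : List String → List String
  | [] => []
  | l :: t => if prev ≠ some l then l :: pvAdj (some l) t else pvAdj prev t

theorem pvKeyA_mkRec (l : String) : pvKeyA (pvMkRec l) = l := rfl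

theorem pvLabs_cons (it : List (String × String)) (ts : List (List (String × String))) :
    pvLabs (it :: ts) = if pvItemLabel it = "" then pvLabs ts else pvItemLabel it :: pvLabs ts := by
  by_cases h : pvItemLabel it = "" <;> simp [pvLabs, h]

theorem foldA_eq (items : List (List (String × String))) :
    ∀ (vs : List (List (String × String))) (s : PySem.Set String),
    (items.foldl
      (fun (st : List (List (String × String)) × PySem.Set String) item =>
        let label := pvItemLabel item
        if label = "" ∨ PySem.Set.contains st.2 label = true then st
        else (st.1 ++ [[("value", label), ("label", label)]], PySem.Set.add st.2 label))
      (vs, s)).1 = vs ++ (pvDFrom s (pvLabs items)).map pvMkRec := by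
  induction items with
  | nil => intro vs s; simp [pvLabs, pvDFrom]
  | cons it ts ih =>
    intro vs s
    simp only [List.foldl_cons]
    rw [pvLabs_cons]
    by_cases h0 : pvItemLabel it = ""
    · rw [if_pos h0, if_pos (Or.inl h0)]
      exact ih vs s
    · rw [if_neg h0]
      by_cases h1 : PySem.Set.contains s (pvItemLabel it) = true
      · have hcond : pvItemLabel it = "" ∨ PySem.Set.contains s (pvItemLabel it) = true := Or.inr h1
        rw [if_pos hcond]
        simp only [pvDFrom]
        rw [if_pos h1]
        exact ih vs s
      · have hcond : ¬ (pvItemLabel it = "" ∨ PySem.Set.contains s (pvItemLabel it) = true) := by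
          rintro (h | h)
          · exact h0 h
          · exact h1 h
        rw [if_neg hcond]
        simp only [pvDFrom]
        rw [if_neg h1]
        rw [ih (vs ++ [[("value", pvItemLabel it), ("label", pvItemLabel it)]]) (PySem.Set.add s (pvItemLabel it))]
        simp [pvMkRec]

theorem foldB_eq (ls : List String) :
    ∀ (vs : List (List (String × String))) (prev : Option String),
    (ls.foldl
      (fun (st : List (List (String × String)) × Option String) label =>
        if st.2 ≠ some label then (st.1 ++ [[("value", label), ("label", label)]], some label) else st)
      (vs, prev)).1 = vs ++ (pvAdj prev ls).map pvMkRec := by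
  induction ls with
  | nil => intro vs prev; simp [pvAdj]
  | cons l t ih =>
    intro vs prev
    simp only [List.foldl_cons, pvAdj]
    by_cases h : prev ≠ some l
    · rw [if_pos (by simpa using h), if_pos h, ih]
      simp [pvMkRec]
    · rw [if_neg (by simpa using h), if_neg h, ih]

theorem mem_pvDFrom (ls : List String) :
    ∀ (s : PySem.Set String) (x : String), x ∈ pvDFrom s ls ↔ x ∈ ls ∧ x ∉ s := by
  induction ls with
  | nil => intro s x; simp [pvDFrom]
  | cons l t ih =>
    intro s x
    simp only [pvDFrom]
    by_cases h : PySem.Set.contains s l = true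
    · rw [if_pos h, ih]
      have hl : l ∈ s := (PySem.Set.contains_iff s l).mp h
      constructor
      · rintro ⟨hx, hs⟩; exact ⟨List.mem_cons_of_mem _ hx, hs⟩
      · rintro ⟨hx, hs⟩
        rcases List.mem_cons.mp hx with rfl | hx
        · exact absurd hl hs
        · exact ⟨hx, hs⟩
    · rw [if_neg h]
      have hl : l ∉ s := fun hm => h ((PySem.Set.contains_iff s l).mpr hm)
      constructor
      · intro hx
        rcases List.mem_cons.mp hx with rfl | hx
        · exact ⟨List.mem_cons_self, hl⟩
        · rcases (ih _ _).mp hx with ⟨hxt, hxs⟩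
          rw [PySem.Set.mem_add] at hxs
          exact ⟨List.mem_cons_of_mem _ hxt, fun hm => hxs (Or.inl hm)⟩
      · rintro ⟨hx, hs⟩
        rcases List.mem_cons.mp hx with rfl | hx
        · exact List.mem_cons_self
        · by_cases hxl : x = l
          · subst hxl; exact List.mem_cons_self
          · refine List.mem_cons_of_mem _ ((ih _ _).mpr ⟨hx, ?_⟩)
            rw [PySem.Set.mem_add]
            rintro (hm | hm)
            · exact hs hm
            · exact hxl hm

theorem nodup_pvDFrom (ls : List String) : ∀ (s : PySem.Set String), (pvDFrom s ls).Nodup := by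
  induction ls with
  | nil => intro s; simp [pvDFrom]
  | cons l t ih =>
    intro s
    simp only [pvDFrom]
    split
    · exact ih s
    · refine List.nodup_cons.mpr ⟨fun hm => ?_, ih _⟩
      rcases (mem_pvDFrom t _ l).mp hm with ⟨_, hns⟩
      exact hns ((PySem.Set.mem_add _ _ _).mpr (Or.inr rfl))

theorem mem_pvAdj (ls : List String) :
    ∀ (prev : Option String), ls.Pairwise (· ≤ ·) →
    (∀ p, prev = some p → ∀ x ∈ ls, p ≤ x) →
    ∀ x, x ∈ pvAdj prev ls ↔ x ∈ ls ∧ some x ≠ prev := by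
  induction ls with
  | nil => intro prev _ _ x; simp [pvAdj]
  | cons l t ih =>
    intro prev hpw hinv x
    have hle := (List.pairwise_cons.mp hpw).1
    have hpw' := (List.pairwise_cons.mp hpw).2
    simp only [pvAdj]
    by_cases h : prev ≠ some l
    · rw [if_pos h]
      have hmem := ih (some l) hpw'
        (by rintro p hp y hy; injection hp with hp; subst hp; exact hle y hy) x
      constructor
      · intro hx
        rcases List.mem_cons.mp hx with rfl | hx
        · exact ⟨List.mem_cons_self, fun hc => h hc.symm⟩
        · rcases hmem.mp hx with ⟨hxt, hxl⟩
          have hxl' : x ≠ l := fun he => hxl (by rw [he])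
          refine ⟨List.mem_cons_of_mem _ hxt, ?_⟩
          rintro rfl
          exact hxl' (le_antisymm (hinv x rfl l List.mem_cons_self) (hle x hxt))
      · rintro ⟨hx, hne⟩
        rcases List.mem_cons.mp hx with rfl | hx
        · exact List.mem_cons_self
        · by_cases hxl : x = l
          · subst hxl; exact List.mem_cons_self
          · exact List.mem_cons_of_mem _ (hmem.mpr ⟨hx, fun he => hxl (by injection he)⟩)
    · rw [if_neg h]
      rw [not_not] at h
      have hmem := ih prev hpw'
        (by rintro p hp y hy; rw [hp] at h; injection h with h; subst h; exact hle y hy) x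
      rw [hmem]
      constructor
      · rintro ⟨hx, hne⟩; exact ⟨List.mem_cons_of_mem _ hx, hne⟩
      · rintro ⟨hx, hne⟩
        rcases List.mem_cons.mp hx with rfl | hx
        · exact absurd h.symm hne
        · exact ⟨hx, hne⟩

theorem pairwise_pvAdj (ls : List String) :
    ∀ (prev : Option String), ls.Pairwise (· ≤ ·) →
    (∀ p, prev = some p → ∀ x ∈ ls, p ≤ x) →
    (pvAdj prev ls).Pairwise (· < ·) := by
  induction ls with
  | nil => intro prev _ _; simp [pvAdj]
  | cons l t ih =>
    intro prev hpw hinv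
    have hle := (List.pairwise_cons.mp hpw).1
    have hpw' := (List.pairwise_cons.mp hpw).2
    have hinv' : ∀ p, (some l : Option String) = some p → ∀ x ∈ t, p ≤ x := by
      rintro p hp y hy; injection hp with hp; subst hp; exact hle y hy
    simp only [pvAdj]
    by_cases h : prev ≠ some l
    · rw [if_pos h]
      refine List.pairwise_cons.mpr ⟨fun y hy => ?_, ih (some l) hpw' hinv'⟩
      rcases (mem_pvAdj t (some l) hpw' hinv' y).mp hy with ⟨hyt, hyl⟩
      exact lt_of_le_of_ne (hle y hyt) (fun he => hyl (by rw [he]))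
    · rw [if_neg h]
      rw [not_not] at h
      exact ih prev hpw'
        (by rintro p hp y hy; rw [hp] at h; injection h with h; subst h; exact hle y hy)

theorem nodup_pvAdjQ {ls : List String} (h : ls.Pairwise (· < ·)) : ls.Nodup :=
  h.imp (fun hlt => ne_of_lt hlt)

-- ===== VERDICT (by name: the statement is the Claim_ definition above) =====
theorem build_source_options_spec : Claim_equal_build_source_options := by
  intro items _ _
  unfold Spec_build_source_options
  dsimp only [build_source_options, build_source_options_alt]
  rw [foldA_eq items [] PySem.Set.empty, foldB_eq _ [] none]
  simp only [List.nil_append]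
  set L := pvLabs items with hL
  set S := PySem.List.sorted L (fun x => x) false with hS
  have hSpw : S.Pairwise (· ≤ ·) := by
    simpa using PySem.List.sorted_pairwise (xs := L) (key := fun x => x)
  have hinvnone : ∀ p, (none : Option String) = some p → ∀ x ∈ S, p ≤ x := by
    rintro p hp; cases hp
  have hmemQ : ∀ x, x ∈ pvAdj none S ↔ x ∈ L := by
    intro x
    rw [mem_pvAdj S none hSpw hinvnone x]
    simp [PySem.List.mem_sorted, hS]
  have hmemP : ∀ x, x ∈ pvDFrom PySem.Set.empty L ↔ x ∈ L := by
    intro x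
    rw [mem_pvDFrom L PySem.Set.empty x]
    simp [PySem.Set.empty]
  have hQlt : (pvAdj none S).Pairwise (· < ·) := pairwise_pvAdj S none hSpw hinvnone
  have hperm : (pvAdj none S).Perm (pvDFrom PySem.Set.empty L) := by
    rw [List.perm_ext_iff_of_nodup (nodup_pvAdjQ hQlt) (nodup_pvDFrom L PySem.Set.empty)]
    intro x; rw [hmemQ x, hmemP x]
  have hpermM : ((pvAdj none S).map pvMkRec).Perm ((pvDFrom PySem.Set.empty L).map pvMkRec) :=
    hperm.map pvMkRec
  have hpwM : ((pvAdj none S).map pvMkRec).Pairwise (fun a b => pvKeyA a < pvKeyA b) := by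
    rw [List.pairwise_map]
    exact hQlt.imp (fun {a b} hab => by rw [pvKeyA_mkRec, pvKeyA_mkRec]; exact hab)
  exact PySem.List.sorted_eq_of_perm_of_pairwise_lt _ _ pvKeyA hpermM hpwM
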